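-- pv_equiv track=rewrite | github.com/Yzzaslg/redesdepc2k25.1 | 25.08.12_IV/Q2/robo_funcoes.py | movimenta
-- ===== SOURCE A (Python) =====
-- def movimenta(posicaoXY: tuple, comandos: str) -> tuple:
--     x, y = posicaoXY
--     movimentos_validos = ''
--     movimentos_invalidos = ''
--     movimentos = 0
--
--     for letra in comandos:
-- # Mapeamento das direções
-- # As letras U/D mexem só no eixo Y, L/R mexem só no eixo X,
-- # e as diagonais (N, O, E, W) são combinação dos dois.
--         if letra == 'U': # Cima
--             x = x + 0
--             y = y + 1
--             movimentos_validos = movimentos_validos + letra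
--             movimentos = movimentos + 1
--         elif letra == 'D': # Baixo
--             x += 0
--             y += -1
--             movimentos_validos += letra
--             movimentos += 1
--         elif letra == 'R': # Direita
--             x += 1
--             y += 0
--             movimentos_validos += letra
--             movimentos += 1
--         elif letra == 'L': # Esquerda
--             x += -1
--             y += 0
--             movimentos_validos += letra
--             movimentos += 1
--         elif letra == 'N': # Cima-direita/nordeste
--             x += 1
--             y += 1
--             movimentos_validos += letra
--             movimentos += 1
--         elif letra == 'O': # Cima-esquerda/noroeste
--             x += -1
--             y += 1
--             movimentos_validos += letra
--             movimentos += 1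
--         elif letra == 'E': # Baixo-direita/sudeste
--             x += 1
--             y +=-1
--             movimentos_validos += letra
--             movimentos += 1
--         elif letra == 'W': # Baixo-esquerda/sudoeste
--             x += -1
--             y += -1
--             movimentos_validos += letra
--             movimentos += 1
--         else:
--             movimentos_invalidos += letra # Vai retornar as letras inválidas dos movimentos.
--
--     return (posicaoXY, movimentos_validos, movimentos_invalidos, movimentos, (x, y))
-- ===== SOURCE B (Python) =====
-- VALID = 'UDRLNOEW'
--
--
-- def movimenta(posicaoXY: tuple, comandos: str) -> tuple:
--     # Staged passes: partition the letters by filtering, then derive the final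
--     # position arithmetically from per-letter counts (no per-step accumulation).
--     validos = ''.join(c for c in comandos if c in VALID)
--     invalidos = ''.join(c for c in comandos if c not in VALID)
--     cnt = {l: comandos.count(l) for l in VALID}
--     x = posicaoXY[0] + cnt['R'] - cnt['L'] + cnt['N'] - cnt['O'] + cnt['E'] - cnt['W']
--     y = posicaoXY[1] + cnt['U'] - cnt['D'] + cnt['N'] + cnt['O'] - cnt['E'] - cnt['W']
--     return (posicaoXY, validos, invalidos, len(validos), (x, y))
-- ===== Notes on version B (the rewrite author's own statement) =====
-- stated objective: alternative
-- what changed: Replaces A's single pass with per-step accumulation of position, counter and growing strings by staged passes: two filters partition the letters into valid/invalid, and the final position is computed in closed form from the eight per-letter counts (x,y as signed sums of counts).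
import Mathlib
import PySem

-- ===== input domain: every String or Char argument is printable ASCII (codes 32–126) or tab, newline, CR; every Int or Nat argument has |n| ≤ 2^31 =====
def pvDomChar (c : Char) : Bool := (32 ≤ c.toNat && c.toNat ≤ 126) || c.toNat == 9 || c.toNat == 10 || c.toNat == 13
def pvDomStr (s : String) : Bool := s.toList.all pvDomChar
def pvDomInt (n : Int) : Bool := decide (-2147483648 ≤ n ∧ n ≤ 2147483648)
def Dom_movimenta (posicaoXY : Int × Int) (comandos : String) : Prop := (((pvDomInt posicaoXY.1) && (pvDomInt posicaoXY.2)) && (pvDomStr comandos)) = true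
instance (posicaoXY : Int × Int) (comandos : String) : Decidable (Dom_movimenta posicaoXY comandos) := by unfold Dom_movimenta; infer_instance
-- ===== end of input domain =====

-- B replaces A's single accumulating pass with staged filters plus a closed-form
-- position from per-letter counts. Objective: alternative (same cost, different algorithm).

-- ===== PORT A =====
-- A's loop state: (x, y, movimentos_validos, movimentos_invalidos, movimentos);
-- string accumulators carried as List Char (exact: '+=' on str is character-list append).
def stepA (st : Int × Int × List Char × List Char × Int) (letra : Char) :
    Int × Int × List Char × List Char × Int :=
  let (x, y, mv, mi, m) := st
  if letra = 'U' then (x + 0, y + 1, mv ++ [letra], mi, m + 1)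
  else if letra = 'D' then (x + 0, y + (-1), mv ++ [letra], mi, m + 1)
  else if letra = 'R' then (x + 1, y + 0, mv ++ [letra], mi, m + 1)
  else if letra = 'L' then (x + (-1), y + 0, mv ++ [letra], mi, m + 1)
  else if letra = 'N' then (x + 1, y + 1, mv ++ [letra], mi, m + 1)
  else if letra = 'O' then (x + (-1), y + 1, mv ++ [letra], mi, m + 1)
  else if letra = 'E' then (x + 1, y + (-1), mv ++ [letra], mi, m + 1)
  else if letra = 'W' then (x + (-1), y + (-1), mv ++ [letra], mi, m + 1)
  else (x, y, mv, mi ++ [letra], m)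

def movimenta (posicaoXY : Int × Int) (comandos : String) :
    (Int × Int) × String × String × Int × (Int × Int) :=
  let st := comandos.toList.foldl stepA (posicaoXY.1, posicaoXY.2, [], [], 0)
  (posicaoXY, String.ofList st.2.2.1, String.ofList st.2.2.2.1, st.2.2.2.2, (st.1, st.2.1))

-- ===== PORT B =====
-- the module-level VALID = 'UDRLNOEW' of Source B, as its character list
def pvVALID : List Char := ['U', 'D', 'R', 'L', 'N', 'O', 'E', 'W']

-- comandos.count(l) for a single character l (exact on single-char needles)
def cntB (cs : List Char) (l : Char) : Int := (cs.count l : Int)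

def movimenta_alt (posicaoXY : Int × Int) (comandos : String) :
    (Int × Int) × String × String × Int × (Int × Int) :=
  let cs := comandos.toList
  let validos := cs.filter (fun c => pvVALID.contains c)
  let invalidos := cs.filter (fun c => !pvVALID.contains c)
  let x := posicaoXY.1 + cntB cs 'R' - cntB cs 'L' + cntB cs 'N' - cntB cs 'O'
             + cntB cs 'E' - cntB cs 'W'
  let y := posicaoXY.2 + cntB cs 'U' - cntB cs 'D' + cntB cs 'N' + cntB cs 'O'
             - cntB cs 'E' - cntB cs 'W'
  (posicaoXY, String.ofList validos, String.ofList invalidos, (validos.length : Int), (x, y))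

-- ===== PRECONDITION & SPEC =====
def Spec_movimenta (posicaoXY : Int × Int) (comandos : String) (out : (Int × Int) × String × String × Int × (Int × Int)) : Prop := out = movimenta_alt posicaoXY comandos
instance (posicaoXY : Int × Int) (comandos : String) (out : (Int × Int) × String × String × Int × (Int × Int)) : Decidable (Spec_movimenta posicaoXY comandos out) := by unfold Spec_movimenta; infer_instance

-- ===== CLAIM (what is proved, stated in full; the proofs are below) =====
def Claim_equal_movimenta : Prop := ∀ (posicaoXY : Int × Int) (comandos : String), Dom_movimenta posicaoXY comandos → Spec_movimenta posicaoXY comandos (movimenta posicaoXY comandos)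

-- ===== LEMMAS AND PROOFS =====
-- Loop invariant: A's fold from (x, y, vs, is, n) yields B's staged quantities,
-- shifted by the starting accumulators.
theorem loopA_closed (cs : List Char) : ∀ (x y : Int) (vs is : List Char) (n : Int),
    cs.foldl stepA (x, y, vs, is, n) =
      (x + cntB cs 'R' - cntB cs 'L' + cntB cs 'N' - cntB cs 'O' + cntB cs 'E' - cntB cs 'W',
       y + cntB cs 'U' - cntB cs 'D' + cntB cs 'N' + cntB cs 'O' - cntB cs 'E' - cntB cs 'W',
       vs ++ cs.filter (fun c => pvVALID.contains c),
       is ++ cs.filter (fun c => !pvVALID.contains c),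
       n + ((cs.filter (fun c => pvVALID.contains c)).length : Int)) := by
  induction cs with
  | nil => intro x y vs is n; simp [cntB]
  | cons c cs ih =>
    intro x y vs is n
    simp only [List.foldl_cons, stepA]
    split_ifs with h1 h2 h3 h4 h5 h6 h7 h8 <;>
      rw [ih] <;>
      first
        | (subst h1; simp [cntB, pvVALID]; omega)
        | (subst h2; simp [cntB, pvVALID]; omega)
        | (subst h3; simp [cntB, pvVALID]; omega)
        | (subst h4; simp [cntB, pvVALID]; omega)
        | (subst h5; simp [cntB, pvVALID]; omega)
        | (subst h6; simp [cntB, pvVALID]; omega)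
        | (subst h7; simp [cntB, pvVALID]; omega)
        | (subst h8; simp [cntB, pvVALID]; omega)
        | (simp only [cntB, pvVALID] at *; simp [h1, h2, h3, h4, h5, h6, h7, h8])

theorem movimenta_eq (posicaoXY : Int × Int) (comandos : String) :
    movimenta posicaoXY comandos = movimenta_alt posicaoXY comandos := by
  have h := loopA_closed comandos.toList posicaoXY.1 posicaoXY.2 [] [] 0
  simp [movimenta, movimenta_alt, h]

-- ===== VERDICT (by name: the statement is the Claim_ definition above) =====
theorem movimenta_spec : Claim_equal_movimenta := by
  intro posicaoXY comandos _
  exact movimenta_eq posicaoXY comandos
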